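-- pv_equiv track=rewrite | github.com/geraud-g/advent-of-code | aoc_2016/day_07/day_07.py | support_ssl
-- ===== SOURCE A (Python) =====
-- Hypernet = tuple[str, ...]
--
-- Supernet = tuple[str, ...]
--
-- def support_ssl(supernet: Supernet, hypernet: Hypernet) -> bool:
--     for chunk in supernet:
--         for idx in range(len(chunk) - 2):
--             aba = chunk[idx] + chunk[idx + 1] + chunk[idx + 2]
--             if not (aba[0] == aba[2] and aba[0] != aba[1]):
--                 continue
--             bab = aba[1] + aba[0] + aba[1]
--             if any(bab in x for x in hypernet):
--                 return True
--     return False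
-- ===== SOURCE B (Python) =====
-- def support_ssl(supernet, hypernet):
--     s = {(t[0], t[1])
--          for chunk in supernet
--          for t in zip(chunk, chunk[1:], chunk[2:])
--          if t[0] == t[2] and t[0] != t[1]}
--     h = {(t[1], t[0])
--          for chunk in hypernet
--          for t in zip(chunk, chunk[1:], chunk[2:])
--          if t[0] == t[2] and t[0] != t[1]}
--     return bool(s & h)
-- ===== Notes on version B (the rewrite author's own statement) =====
-- stated objective: alternative
-- what changed: Instead of scanning every hypernet string for the BAB substring once per supernet ABA window, B builds a set of supernet (a,b) ABA pairs and a set of transposed hypernet (b,a) pairs in two independent passes and returns whether the sets intersect.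
import Mathlib
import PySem

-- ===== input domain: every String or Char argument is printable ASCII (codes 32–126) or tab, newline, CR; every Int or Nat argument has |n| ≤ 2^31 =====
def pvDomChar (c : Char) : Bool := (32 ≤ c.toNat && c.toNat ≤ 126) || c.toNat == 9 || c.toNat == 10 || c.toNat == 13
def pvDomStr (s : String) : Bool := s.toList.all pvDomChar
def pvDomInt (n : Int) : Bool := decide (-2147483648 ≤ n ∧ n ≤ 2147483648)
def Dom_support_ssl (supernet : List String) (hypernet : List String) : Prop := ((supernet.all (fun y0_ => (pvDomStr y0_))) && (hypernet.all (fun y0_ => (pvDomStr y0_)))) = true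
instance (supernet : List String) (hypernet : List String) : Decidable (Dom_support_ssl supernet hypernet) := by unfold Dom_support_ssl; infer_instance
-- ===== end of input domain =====

-- B tabulates the supernet ABA pairs and the transposed hypernet ABA pairs as two sets in two
-- independent passes and tests set intersection, instead of A's per-ABA scan of every hypernet.

-- ===== PORT A =====
def support_ssl (supernet : List String) (hypernet : List String) : Bool :=
  supernet.any (fun chunk =>
    let cs := chunk.toList
    (PySem.List.pyRange 0 ((cs.length : Int) - 2) 1).any (fun idx =>
      let a := PySem.List.pyGetD cs idx ' '
      let b := PySem.List.pyGetD cs (idx + 1) ' '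
      let c := PySem.List.pyGetD cs (idx + 2) ' '
      if !(a == c && a != b) then false
      else hypernet.any (fun x => PySem.Chars.isIn [b, a, b] x.toList)))

-- ===== PORT B =====
-- zip(chunk, chunk[1:], chunk[2:]): the 3-character windows of a string
def pvWindows : List Char → List (Char × Char × Char)
  | x :: y :: z :: rest => (x, y, z) :: pvWindows (y :: z :: rest)
  | _ => []

-- the (t[0], t[1]) pairs of the ABA-shaped windows of a string
def pvAbas (cs : List Char) : List (Char × Char) :=
  (pvWindows cs).filterMap (fun t => if t.1 == t.2.2 && t.1 != t.2.1 then some (t.1, t.2.1) else none)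

def support_ssl_alt (supernet : List String) (hypernet : List String) : Bool :=
  let s : PySem.Set (Char × Char) :=
    PySem.Set.ofList (supernet.flatMap (fun chunk => pvAbas chunk.toList))
  let h : PySem.Set (Char × Char) :=
    PySem.Set.ofList (hypernet.flatMap (fun chunk => (pvAbas chunk.toList).map (fun p => (p.2, p.1))))
  !(PySem.Set.inter s h).isEmpty

-- ===== PRECONDITION & SPEC =====
def Spec_support_ssl (supernet : List String) (hypernet : List String) (out : Bool) : Prop := out = support_ssl_alt supernet hypernet
instance (supernet : List String) (hypernet : List String) (out : Bool) : Decidable (Spec_support_ssl supernet hypernet out) := by unfold Spec_support_ssl; infer_instance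

-- ===== CLAIM (what is proved, stated in full; the proofs are below) =====
def Claim_equal_support_ssl : Prop := ∀ (supernet : List String) (hypernet : List String), Dom_support_ssl supernet hypernet → Spec_support_ssl supernet hypernet (support_ssl supernet hypernet)

-- ===== LEMMAS AND PROOFS =====

lemma pvWindows_subset_cons (x : Char) (tl : List Char) :
    ∀ t ∈ pvWindows tl, t ∈ pvWindows (x :: tl) := by
  intro t ht
  match tl with
  | [] => simp [pvWindows] at ht
  | [y] => simp [pvWindows] at ht
  | y :: z :: rest => exact List.mem_cons_of_mem _ ht

lemma mem_pvWindows_iff_infix (cs : List Char) (a b c : Char) :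
    (a, b, c) ∈ pvWindows cs ↔ [a, b, c] <:+: cs := by
  induction cs with
  | nil => simp [pvWindows]
  | cons x tl ih =>
    constructor
    · intro h
      match tl, h with
      | [], h => simp [pvWindows] at h
      | [y], h => simp [pvWindows] at h
      | y :: z :: rest, h =>
        rcases List.mem_cons.mp h with heq | h
        · exact ⟨[], rest, by simp_all⟩
        · exact (ih.mp h).trans (List.suffix_cons x (y :: z :: rest)).isInfix
    · intro h
      rcases List.infix_cons_iff.mp h with hpre | hinf
      · rcases hpre with ⟨r, hr⟩
        obtain ⟨hx, htl⟩ := List.cons_eq_cons.mp hr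
        subst hx htl
        exact List.mem_cons_self
      · exact pvWindows_subset_cons x tl _ (ih.mpr hinf)

-- the index loop over range(len - 2) visits exactly the 3-character windows
theorem any_range_windows : ∀ (cs : List Char) (f : Char → Char → Char → Bool),
    ((List.range (cs.length - 2)).any fun k =>
        f (cs.getD k ' ') (cs.getD (k + 1) ' ') (cs.getD (k + 2) ' '))
      = (pvWindows cs).any (fun t => f t.1 t.2.1 t.2.2)
  | [], _ => rfl
  | [_], _ => rfl
  | [_, _], _ => rfl
  | x :: y :: z :: rest, f => by
    have ih := any_range_windows (y :: z :: rest) f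
    have e1 : (y :: z :: rest).length - 2 = rest.length := by
      simp only [List.length_cons]; omega
    rw [e1] at ih
    have e2 : (x :: y :: z :: rest).length - 2 = rest.length + 1 := by
      simp only [List.length_cons]; omega
    rw [e2, List.range_succ_eq_map, List.any_cons, List.any_map,
        show pvWindows (x :: y :: z :: rest) = (x, y, z) :: pvWindows (y :: z :: rest) from rfl,
        List.any_cons, ← ih]
    exact congrArg (f x y z || ·) (PySem.List.any_congr_mem (fun k _ => rfl))

lemma pyRange_any_eq (n : Nat) (g : Int → Bool) :
    (PySem.List.pyRange 0 ((n : Int) - 2) 1).any g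
      = (List.range (n - 2)).any (fun k => g (k : Int)) := by
  rw [PySem.List.pyRange_one, List.any_map]
  have e : (((n : Int) - 2) - 0).toNat = n - 2 := by omega
  rw [e]
  exact PySem.List.any_congr_mem (fun k _ => by simp)

-- A, rewritten as a scan over the windows
lemma support_ssl_eq (supernet hypernet : List String) :
    support_ssl supernet hypernet
      = supernet.any (fun chunk => (pvWindows chunk.toList).any (fun t =>
          if !(t.1 == t.2.2 && t.1 != t.2.1) then false
          else hypernet.any (fun x => PySem.Chars.isIn [t.2.1, t.1, t.2.1] x.toList))) := by
  unfold support_ssl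
  apply PySem.List.any_congr_mem
  intro chunk _
  rw [pyRange_any_eq chunk.toList.length,
      ← any_range_windows chunk.toList (fun a b c =>
        if !(a == c && a != b) then false
        else hypernet.any (fun x => PySem.Chars.isIn [b, a, b] x.toList))]
  apply PySem.List.any_congr_mem
  intro k _
  have h1 : ((k : Int) + 1) = ((k + 1 : Nat) : Int) := by push_cast; ring
  have h2 : ((k : Int) + 2) = ((k + 2 : Nat) : Int) := by push_cast; ring
  dsimp only
  rw [h1, h2]
  simp only [PySem.List.pyGetD_natCast]

lemma support_ssl_iff (supernet hypernet : List String) :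
    support_ssl supernet hypernet = true ↔
      ∃ a b, a ≠ b ∧ (∃ c ∈ supernet, (a, b, a) ∈ pvWindows c.toList) ∧
        (∃ x ∈ hypernet, (b, a, b) ∈ pvWindows x.toList) := by
  rw [support_ssl_eq]
  simp only [List.any_eq_true]
  constructor
  · rintro ⟨chunk, hc, ⟨u, v, w⟩, ht, hcond⟩
    dsimp only at hcond
    by_cases h : (u == w && u != v) = true
    · rw [show (!(u == w && u != v)) = false by simp [h]] at hcond
      rw [if_neg (by simp), List.any_eq_true] at hcond
      obtain ⟨x, hx, hin⟩ := hcond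
      rw [PySem.Chars.isIn_iff_infix] at hin
      rw [Bool.and_eq_true, beq_iff_eq, bne_iff_ne] at h
      exact ⟨w, v, h.1 ▸ h.2, ⟨chunk, hc, h.1 ▸ ht⟩,
        ⟨x, hx, (mem_pvWindows_iff_infix _ _ _ _).mpr (h.1 ▸ hin)⟩⟩
    · rw [Bool.not_eq_true] at h
      rw [show (!(u == w && u != v)) = true by simp [h]] at hcond
      rw [if_pos rfl] at hcond
      exact absurd hcond (by simp)
  · rintro ⟨a, b, hne, ⟨chunk, hc, hw⟩, x, hx, hxw⟩
    refine ⟨chunk, hc, (a, b, a), hw, ?_⟩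
    dsimp only
    rw [if_neg (by simp [hne]), List.any_eq_true]
    exact ⟨x, hx, (PySem.Chars.isIn_iff_infix _ _).mpr ((mem_pvWindows_iff_infix _ _ _ _).mp hxw)⟩

lemma mem_pvAbas (cs : List Char) (a b : Char) :
    (a, b) ∈ pvAbas cs ↔ a ≠ b ∧ (a, b, a) ∈ pvWindows cs := by
  unfold pvAbas
  rw [List.mem_filterMap]
  constructor
  · rintro ⟨⟨u, v, w⟩, ht, hsome⟩
    dsimp only at hsome
    by_cases h : (u == w && u != v) = true
    · rw [if_pos h] at hsome
      obtain ⟨hu, hv⟩ := Prod.mk.injEq .. ▸ Option.some.inj hsome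
      rw [Bool.and_eq_true, beq_iff_eq, bne_iff_ne] at h
      subst hu hv
      exact ⟨h.2, h.1.symm ▸ ht⟩
    · rw [if_neg h] at hsome
      exact absurd hsome (by simp)
  · rintro ⟨hne, hwin⟩
    refine ⟨(a, b, a), hwin, ?_⟩
    dsimp only
    rw [if_pos (by simp [hne])]

lemma bool_not_isEmpty {α : Type} (l : List α) : (!l.isEmpty) = true ↔ ∃ p, p ∈ l := by
  cases l <;> simp

lemma support_ssl_alt_iff (supernet hypernet : List String) :
    support_ssl_alt supernet hypernet = true ↔
      ∃ a b, a ≠ b ∧ (∃ c ∈ supernet, (a, b, a) ∈ pvWindows c.toList) ∧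
        (∃ x ∈ hypernet, (b, a, b) ∈ pvWindows x.toList) := by
  unfold support_ssl_alt
  rw [bool_not_isEmpty]
  constructor
  · rintro ⟨⟨a, b⟩, hp⟩
    rw [PySem.Set.mem_inter, PySem.Set.mem_ofList, PySem.Set.mem_ofList,
        List.mem_flatMap, List.mem_flatMap] at hp
    obtain ⟨⟨c, hc, hcs⟩, ⟨x, hx, hxs⟩⟩ := hp
    rw [List.mem_map] at hxs
    obtain ⟨⟨p, q⟩, hpq, hpqe⟩ := hxs
    obtain ⟨hq, hp'⟩ := Prod.mk.injEq .. ▸ hpqe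
    dsimp only at hq hp'
    rw [hp', hq] at hpq
    rw [mem_pvAbas] at hcs hpq
    exact ⟨a, b, hcs.1, ⟨c, hc, hcs.2⟩, ⟨x, hx, hpq.2⟩⟩
  · rintro ⟨a, b, hne, ⟨c, hc, hcw⟩, x, hx, hxw⟩
    refine ⟨(a, b), ?_⟩
    rw [PySem.Set.mem_inter, PySem.Set.mem_ofList, PySem.Set.mem_ofList,
        List.mem_flatMap, List.mem_flatMap]
    refine ⟨⟨c, hc, (mem_pvAbas _ _ _).mpr ⟨hne, hcw⟩⟩, ⟨x, hx, ?_⟩⟩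
    rw [List.mem_map]
    exact ⟨(b, a), (mem_pvAbas _ _ _).mpr ⟨Ne.symm hne, hxw⟩, rfl⟩

-- ===== VERDICT (by name: the statement is the Claim_ definition above) =====
theorem support_ssl_spec : Claim_equal_support_ssl := by
  intro supernet hypernet _
  unfold Spec_support_ssl
  have h := (support_ssl_iff supernet hypernet).trans (support_ssl_alt_iff supernet hypernet).symm
  cases hA : support_ssl supernet hypernet
  · cases hB : support_ssl_alt supernet hypernet
    · rfl
    · exact absurd (h.mpr hB) (by simp [hA])
  · exact (h.mp hA).symm
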